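-- pv_equiv track=rewrite | github.com/stuchain/CuePoint | example.py | _subset_join
-- ===== SOURCE A (Python) =====
-- from typing import List, Dict, Optional, Tuple
-- from itertools import combinations, permutations
--
-- def _ordered_unique(seq: List[str]) -> List[str]:
--     seen = set(); out = []
--     for s in seq:
--         k = s.lower().strip()
--         if k and k not in seen:
--             seen.add(k); out.append(s.strip())
--     return out
--
-- def _subset_join(tokens: List[str], max_r: Optional[int] = None) -> List[str]:
--     if not tokens:
--         return []
--     out = []
--     n = len(tokens)
--     upper = n if max_r is None else min(max_r, n)
--     for r in range(1, upper + 1):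
--         for comb in combinations(tokens, r):
--             out.append(" ".join(comb))
--     return _ordered_unique(out)
-- ===== SOURCE B (Python) =====
-- from typing import List, Optional
--
-- def _subset_join(tokens: List[str], max_r: Optional[int] = None) -> List[str]:
--     if not tokens:
--         return []
--     n = len(tokens)
--     upper = n if max_r is None else min(max_r, n)
--     seen = set()
--     out = []
--
--     def emit(words: List[str]) -> None:
--         s = " ".join(words)
--         k = s.lower().strip()
--         if k and k not in seen:
--             seen.add(k)
--             out.append(s.strip())
--
--     def go(rest: List[str], remaining: int, prefix: List[str]) -> None:
--         # recursive backtracking: include-first then exclude-first gives the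
--         # same order as itertools.combinations
--         if remaining == 0:
--             emit(prefix)
--             return
--         if len(rest) < remaining:
--             return
--         head, tail = rest[0], rest[1:]
--         go(tail, remaining - 1, prefix + [head])
--         go(tail, remaining, prefix)
--
--     for r in range(1, upper + 1):
--         go(tokens, r, [])
--     return out
-- ===== Notes on version B (the rewrite author's own statement) =====
-- stated objective: alternative
-- what changed: Replaces itertools.combinations with a recursive include/exclude backtracking generator and fuses the ordered-unique deduplication into the emission step, so no intermediate list of all joined combinations is built.
import Mathlib
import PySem

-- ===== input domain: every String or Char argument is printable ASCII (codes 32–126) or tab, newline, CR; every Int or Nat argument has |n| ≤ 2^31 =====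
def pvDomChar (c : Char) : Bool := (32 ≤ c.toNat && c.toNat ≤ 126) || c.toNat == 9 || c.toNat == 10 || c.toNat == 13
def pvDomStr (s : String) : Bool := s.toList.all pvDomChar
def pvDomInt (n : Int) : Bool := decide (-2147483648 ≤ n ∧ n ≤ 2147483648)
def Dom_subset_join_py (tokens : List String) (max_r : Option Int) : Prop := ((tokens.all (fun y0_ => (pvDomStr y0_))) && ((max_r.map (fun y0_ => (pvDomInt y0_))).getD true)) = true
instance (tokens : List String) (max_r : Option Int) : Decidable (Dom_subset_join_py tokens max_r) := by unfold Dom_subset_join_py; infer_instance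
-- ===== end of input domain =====

-- B replaces itertools.combinations by a recursive include/exclude backtracker and fuses the
-- ordered-unique dedup into the emission step (objective: alternative decomposition, same cost).

-- ===== PORT A =====

-- itertools.combinations(xs, r), ported as the standard recursive definition with the
-- same emission order (lexicographic by index: tuples containing xs[0] first).
def pvCombs : List String → Nat → List (List String)
  | _, 0 => [[]]
  | [], _ + 1 => []
  | x :: xs, r + 1 => (pvCombs xs r).map (fun c => x :: c) ++ pvCombs xs (r + 1)

-- one step of _ordered_unique's loop body
def pvOuStep (st : PySem.Set String × List String) (s : String) : PySem.Set String × List String :=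
  let k := PySem.Str.strip (PySem.Str.lower s)
  if k ≠ "" && !(PySem.Set.contains st.1 k) then (PySem.Set.add st.1 k, st.2 ++ [PySem.Str.strip s])
  else st

def pvOrderedUnique (seq : List String) : List String :=
  (seq.foldl pvOuStep (PySem.Set.empty, [])).2

def subset_join_py (tokens : List String) (max_r : Option Int) : List String :=
  if tokens = [] then []
  else
    let n : Int := tokens.length
    let upper : Int := match max_r with | none => n | some m => min m n
    -- r ∈ range(1, upper+1) is ≥ 1, so r.toNat is exact
    let out := (PySem.List.pyRange 1 (upper + 1) 1).foldl
      (fun out r => (pvCombs tokens r.toNat).foldl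
        (fun out c => out ++ [PySem.Str.join " " c]) out) []
    pvOrderedUnique out

-- ===== PORT B =====

-- B's emit(words): join, key, dedup-insert
def pvEmit (words : List String) (st : PySem.Set String × List String) :
    PySem.Set String × List String :=
  let s := PySem.Str.join " " words
  let k := PySem.Str.strip (PySem.Str.lower s)
  if k ≠ "" && !(PySem.Set.contains st.1 k) then (PySem.Set.add st.1 k, st.2 ++ [PySem.Str.strip s])
  else st

-- B's go(rest, remaining, prefix): include head, then exclude head
def pvGo : List String → Nat → List String → (PySem.Set String × List String) →
    PySem.Set String × List String
  | _, 0, pfx, st => pvEmit pfx st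
  | [], _ + 1, _, st => st
  | h :: t, rem + 1, pfx, st =>
    if (h :: t).length < rem + 1 then st
    else pvGo t (rem + 1) pfx (pvGo t rem (pfx ++ [h]) st)

def subset_join_py_alt (tokens : List String) (max_r : Option Int) : List String :=
  if tokens = [] then []
  else
    let n : Int := tokens.length
    let upper : Int := match max_r with | none => n | some m => min m n
    ((PySem.List.pyRange 1 (upper + 1) 1).foldl
      (fun st r => pvGo tokens r.toNat [] st) (PySem.Set.empty, [])).2

-- ===== PRECONDITION & SPEC =====
def Spec_subset_join_py (tokens : List String) (max_r : Option Int) (out : List String) : Prop := out = subset_join_py_alt tokens max_r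
instance (tokens : List String) (max_r : Option Int) (out : List String) : Decidable (Spec_subset_join_py tokens max_r out) := by unfold Spec_subset_join_py; infer_instance

-- ===== CLAIM (what is proved, stated in full; the proofs are below) =====
def Claim_equal_subset_join_py : Prop := ∀ (tokens : List String) (max_r : Option Int), Dom_subset_join_py tokens max_r → Spec_subset_join_py tokens max_r (subset_join_py tokens max_r)

-- ===== LEMMAS AND PROOFS =====

theorem pvCombs_eq_nil_of_lt : ∀ (xs : List String) (r : Nat), xs.length < r → pvCombs xs r = [] := by
  intro xs
  induction xs with
  | nil => intro r h; cases r with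
    | zero => omega
    | succ r => rfl
  | cons x xs ih =>
    intro r h
    cases r with
    | zero => omega
    | succ r =>
      simp only [pvCombs]
      have h' : xs.length < r := by simp at h; omega
      rw [ih r h', ih (r + 1) (by omega)]
      simp

theorem pvGo_eq : ∀ (rest : List String) (rem : Nat) (pfx : List String)
    (st : PySem.Set String × List String),
    pvGo rest rem pfx st =
      (pvCombs rest rem).foldl (fun st c => pvEmit (pfx ++ c) st) st := by
  intro rest
  induction rest with
  | nil =>
    intro rem pfx st
    cases rem with
    | zero => simp [pvGo, pvCombs]
    | succ rem => simp [pvGo, pvCombs]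
  | cons h t ih =>
    intro rem pfx st
    cases rem with
    | zero => simp [pvGo, pvCombs]
    | succ rem =>
      simp only [pvGo]
      by_cases hlt : (h :: t).length < rem + 1
      · rw [if_pos hlt, pvCombs_eq_nil_of_lt _ _ hlt]
        rfl
      · rw [if_neg hlt]
        simp only [pvCombs, List.foldl_append, List.foldl_map]
        have hfun : (fun (st : PySem.Set String × List String) c => pvEmit (pfx ++ h :: c) st)
            = fun st c => pvEmit ((pfx ++ [h]) ++ c) st := by
          funext st c
          rw [List.append_cons]
        rw [hfun, ih, ih]

-- a loop of inner folds is one fold over the flattened list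
theorem foldl_foldl_flatMap {α β γ : Type} (f : γ → α → γ) (g : β → List α) :
    ∀ (l : List β) (init : γ),
      l.foldl (fun st r => (g r).foldl f st) init = (l.flatMap g).foldl f init := by
  intro l
  induction l with
  | nil => intro init; rfl
  | cons a l ih => intro init; simp [List.foldl_append, ih]

theorem pvGo_top_eq (tokens : List String) (r : Nat) (st : PySem.Set String × List String) :
    pvGo tokens r [] st = ((pvCombs tokens r).map (PySem.Str.join " ")).foldl pvOuStep st := by
  rw [pvGo_eq, List.foldl_map]
  rfl

-- ===== VERDICT (by name: the statement is the Claim_ definition above) =====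
theorem subset_join_py_spec : Claim_equal_subset_join_py := by
  intro tokens max_r _
  unfold Spec_subset_join_py subset_join_py subset_join_py_alt
  by_cases h : tokens = []
  · simp [h]
  · rw [if_neg h, if_neg h]
    simp only [pvOrderedUnique]
    congr 1
    simp only [PySem.List.foldl_append_singleton_eq_map]
    rw [PySem.List.foldl_append_eq_flatMap]
    simp only [pvGo_top_eq, List.nil_append]
    rw [foldl_foldl_flatMap]
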